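-- pv_equiv track=rewrite | github.com/African-Football-Pulse/afp-v2 | src/sections/s_news_club_highlight.py | pick_best_club
-- ===== SOURCE A (Python) =====
-- from collections import Counter
--
-- def pick_best_club(candidates, exclude_club=None):
--     counts, clubs = Counter(), {}
--     for c in candidates:
--         club = c.get("player", {}).get("club")
--         if not club:
--             continue
--         counts[club] += 1
--         clubs.setdefault(club, []).append(c)
--     if not counts:
--         return None, []
--     for club, _ in counts.most_common():
--         if club != exclude_club:
--             return club, clubs[club]
--     return None, []
-- ===== SOURCE B (Python) =====
-- def pick_best_club(candidates, exclude_club=None):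
--     clubs = {}
--     for c in candidates:
--         club = c.get("player", {}).get("club")
--         if club:
--             clubs.setdefault(club, []).append(c)
--     eligible = [club for club in clubs if club != exclude_club]
--     if not eligible:
--         return None, []
--     best = max(eligible, key=lambda club: len(clubs[club]))
--     return best, clubs[best]
-- ===== Notes on version B (the rewrite author's own statement) =====
-- stated objective: simpler
-- what changed: Drops the Counter and most_common()'s sort entirely: one pass builds only the clubs dict, then a single linear max over the insertion-ordered eligible keys (len of each bucket) picks the winner, matching most_common's stable tie-breaking.
import Mathlib
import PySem

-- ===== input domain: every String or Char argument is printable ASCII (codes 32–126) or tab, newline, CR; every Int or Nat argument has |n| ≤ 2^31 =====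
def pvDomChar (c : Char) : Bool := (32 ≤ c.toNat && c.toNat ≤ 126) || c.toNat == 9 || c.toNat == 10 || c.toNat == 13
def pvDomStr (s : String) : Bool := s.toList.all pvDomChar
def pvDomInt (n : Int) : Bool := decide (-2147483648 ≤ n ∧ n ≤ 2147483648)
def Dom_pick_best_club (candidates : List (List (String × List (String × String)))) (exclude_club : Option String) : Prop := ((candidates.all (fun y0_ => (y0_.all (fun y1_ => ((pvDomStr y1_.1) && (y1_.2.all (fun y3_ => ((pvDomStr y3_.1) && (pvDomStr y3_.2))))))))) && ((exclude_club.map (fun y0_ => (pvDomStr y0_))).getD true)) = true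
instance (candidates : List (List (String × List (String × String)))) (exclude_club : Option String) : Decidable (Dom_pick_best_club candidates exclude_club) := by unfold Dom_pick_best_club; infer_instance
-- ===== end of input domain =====

-- B drops the Counter and most_common()'s sort: one pass builds only the clubs dict, then a single
-- linear max over the insertion-ordered eligible keys picks the winner (objective: simpler).

-- ===== PORT A =====
abbrev PBCand := List (String × List (String × String))

-- c.get("player", {}).get("club")  (this field access appears verbatim in both Pythons)
def pbcClub? (c : PBCand) : Option String :=
  PySem.Dict.get? (PySem.Dict.mk ((PySem.Dict.get? (PySem.Dict.mk c) "player").getD [])) "club"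

-- A's loop body: skip falsy club (None or ""), else counts[club] += 1; clubs.setdefault(club, []).append(c)
def pbcStepA (st : PySem.Dict String Int × PySem.Dict String (List PBCand)) (c : PBCand) :
    PySem.Dict String Int × PySem.Dict String (List PBCand) :=
  match pbcClub? c with
  | none => st
  | some club =>
      if club = "" then st
      else (st.1.insert club (st.1.getD club 0 + 1),
            st.2.insert club (st.2.getD club [] ++ [c]))

-- 'for club, _ in counts.most_common(): if club != exclude_club: return club, clubs[club]'.
-- clubs[club] cannot raise (counts and clubs always hold the same keys), so it is ported as getD.
def pbcScanA (l : List (String × Int)) (exclude_club : Option String)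
    (clubs : PySem.Dict String (List PBCand)) : Option String × List PBCand :=
  match l with
  | [] => (none, [])
  | (club, _) :: rest =>
      if exclude_club ≠ some club then (some club, clubs.getD club [])
      else pbcScanA rest exclude_club clubs

def pick_best_club (candidates : List (List (String × List (String × String)))) (exclude_club : Option String) : Option String × (List (List (String × List (String × String)))) :=
  let st := candidates.foldl pbcStepA (PySem.Dict.mk [], PySem.Dict.mk [])
  if st.1.items = [] then (none, [])
  -- counts.most_common() is CPython's sorted(counts.items(), key=itemgetter(1), reverse=True)
  else pbcScanA (PySem.List.sorted st.1.items (fun kv => kv.2) true) exclude_club st.2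

-- ===== PORT B =====
-- B's loop body: if club: clubs.setdefault(club, []).append(c)
def pbcStepB (clubs : PySem.Dict String (List PBCand)) (c : PBCand) :
    PySem.Dict String (List PBCand) :=
  match pbcClub? c with
  | some club => if club ≠ "" then clubs.insert club (clubs.getD club [] ++ [c]) else clubs
  | none => clubs

def pick_best_club_alt (candidates : List (List (String × List (String × String)))) (exclude_club : Option String) : Option String × (List (List (String × List (String × String)))) :=
  let clubs := candidates.foldl pbcStepB (PySem.Dict.mk [])
  let eligible := clubs.keys.filter (fun club => exclude_club ≠ some club)
  -- 'if not eligible: return None, []' else 'max(eligible, key=lambda club: len(clubs[club]))'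
  match PySem.List.max? eligible (fun club => ((clubs.getD club []).length : Int)) with
  | none => (none, [])
  | some best => (some best, clubs.getD best [])

-- ===== PRECONDITION & SPEC =====
def Spec_pick_best_club (candidates : List (List (String × List (String × String)))) (exclude_club : Option String) (out : Option String × (List (List (String × List (String × String))))) : Prop := out = pick_best_club_alt candidates exclude_club
instance (candidates : List (List (String × List (String × String)))) (exclude_club : Option String) (out : Option String × (List (List (String × List (String × String))))) : Decidable (Spec_pick_best_club candidates exclude_club out) := by unfold Spec_pick_best_club; infer_instance

-- ===== CLAIM (what is proved, stated in full; the proofs are below) =====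
def Claim_equal_pick_best_club : Prop := ∀ (candidates : List (List (String × List (String × String)))) (exclude_club : Option String), Dom_pick_best_club candidates exclude_club → Spec_pick_best_club candidates exclude_club (pick_best_club candidates exclude_club)

-- ===== LEMMAS AND PROOFS =====

-- the value map that turns a clubs entry into its counts entry
def pbcVal (kv : String × List PBCand) : String × Int := (kv.1, (kv.2.length : Int))

theorem pbc_fold_snd (cs : List PBCand) (st : PySem.Dict String Int × PySem.Dict String (List PBCand)) :
    (cs.foldl pbcStepA st).2 = cs.foldl pbcStepB st.2 := by
  induction cs generalizing st with
  | nil => rfl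
  | cons c cs ih =>
    simp only [List.foldl_cons]
    rw [ih]
    congr 1
    cases h : pbcClub? c with
    | none => simp [pbcStepA, pbcStepB, h]
    | some club =>
      by_cases hc : club = "" <;> simp [pbcStepA, pbcStepB, h, hc]

theorem pbc_getD_cons_ne {ν : Type} (p : String × ν) (rest : List (String × ν)) (k : String) (d : ν)
    (h : (p.1 == k) = false) :
    (PySem.Dict.mk (p :: rest) : PySem.Dict String ν).getD k d
      = (PySem.Dict.mk rest : PySem.Dict String ν).getD k d := by
  simp [PySem.Dict.getD, PySem.Dict.get?, List.find?_cons, h]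

theorem pbc_getD_cons_self {ν : Type} (p : String × ν) (rest : List (String × ν)) (d : ν)
    (h : (p.1 == k) = true) :
    (PySem.Dict.mk (p :: rest) : PySem.Dict String ν).getD k d = p.2 := by
  simp [PySem.Dict.getD, PySem.Dict.get?, List.find?_cons, h]

theorem pbc_insert_cons {ν : Type} (p : String × ν) (rest : List (String × ν)) (k : String) (v : ν)
    (h : (p.1 == k) = false) :
    ((PySem.Dict.mk (p :: rest) : PySem.Dict String ν).insert k v).items
      = p :: ((PySem.Dict.mk rest : PySem.Dict String ν).insert k v).items := by
  have hne : p.1 ≠ k := by simpa using h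
  by_cases hc : rest.any (fun q => q.1 == k) = true
  · simp [PySem.Dict.insert, PySem.Dict.contains, h, hc, hne]
  · simp only [Bool.not_eq_true] at hc
    simp [PySem.Dict.insert, PySem.Dict.contains, h, hc]

theorem pbc_insert_map (items : List (String × List PBCand)) (hn : (items.map Prod.fst).Nodup)
    (k : String) (c : PBCand) :
    ((PySem.Dict.mk (items.map pbcVal) : PySem.Dict String Int).insert k
        ((PySem.Dict.mk (items.map pbcVal) : PySem.Dict String Int).getD k 0 + 1)).items
      = (((PySem.Dict.mk items : PySem.Dict String (List PBCand)).insert k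
        ((PySem.Dict.mk items : PySem.Dict String (List PBCand)).getD k [] ++ [c])).items).map pbcVal := by
  induction items with
  | nil => simp [PySem.Dict.insert, PySem.Dict.contains, PySem.Dict.getD, PySem.Dict.get?, pbcVal]
  | cons p rest ih =>
    simp only [List.map_cons] at *
    cases hpk : (p.1 == k) with
    | true =>
      have hk : p.1 = k := by simpa using hpk
      have hnotin : k ∉ rest.map Prod.fst := by
        subst hk; exact (List.nodup_cons.mp hn).1
      have hrest : ∀ q ∈ rest, (q.1 == k) = false := by
        intro q hq
        simp only [beq_eq_false_iff_ne]
        intro hqk; exact hnotin (hqk ▸ List.mem_map_of_mem hq)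
      have hcontL : ((pbcVal p :: rest.map pbcVal).any (fun q => q.1 == k)) = true := by
        simp [pbcVal, hpk]
      have hcontR : ((p :: rest).any (fun q => q.1 == k)) = true := by simp [hpk]
      have hgL : (PySem.Dict.mk (pbcVal p :: rest.map pbcVal) : PySem.Dict String Int).getD k 0 = (p.2.length : Int) :=
        pbc_getD_cons_self _ _ _ (by simpa [pbcVal] using hpk)
      have hgR : (PySem.Dict.mk (p :: rest) : PySem.Dict String (List PBCand)).getD k [] = p.2 :=
        pbc_getD_cons_self _ _ _ hpk
      rw [hgL, hgR]
      simp only [PySem.Dict.insert, PySem.Dict.contains, hcontL, hcontR]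
      simp only [hcontL, hcontR, if_true]
      simp only [List.map_cons, pbcVal, hpk, if_pos]
      have hreplL : (rest.map pbcVal).map (fun q => if q.1 == k then (k, (p.2.length : Int) + 1) else q) = rest.map pbcVal := by
        have h1 : ∀ q ∈ rest.map pbcVal, (if q.1 == k then (k, (p.2.length : Int) + 1) else q) = id q := by
          intro q hq
          obtain ⟨q', hq', rfl⟩ := List.mem_map.mp hq
          simp [pbcVal, hrest q' hq']
        rw [List.map_congr_left h1, List.map_id]
      have hreplR : rest.map (fun q => if q.1 == k then (k, p.2 ++ [c]) else q) = rest := by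
        have h1 : ∀ q ∈ rest, (if q.1 == k then (k, p.2 ++ [c]) else q) = id q := by
          intro q hq; simp [hrest q hq]
        rw [List.map_congr_left h1, List.map_id]
      simp [hreplL, hreplR, pbcVal]
      intro a b hab
      have hak : a ≠ k := by simpa using hrest (a, b) hab
      simp [hak]
    | false =>
      have hpk' : ((pbcVal p).1 == k) = false := by simpa [pbcVal] using hpk
      rw [pbc_getD_cons_ne _ _ _ _ hpk', pbc_getD_cons_ne _ _ _ _ hpk,
          pbc_insert_cons _ _ _ _ hpk', pbc_insert_cons _ _ _ _ hpk]
      simp only [List.map_cons]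
      congr 1
      exact ih (List.nodup_cons.mp hn).2

theorem pbc_nodup_insert {ν : Type} (d : PySem.Dict String ν) (k : String) (v : ν)
    (hn : (d.items.map Prod.fst).Nodup) : (((d.insert k v).items).map Prod.fst).Nodup := by
  by_cases hc : d.contains k = true
  · have hfst : (Prod.fst ∘ fun q : String × ν => if q.1 == k then (k, v) else q) = Prod.fst := by
      funext q; by_cases hqk : q.1 = k <;> simp [hqk]
    simp only [PySem.Dict.insert, hc, if_true, List.map_map, hfst]
    exact hn
  · have hk : k ∉ d.items.map Prod.fst := by
      simp only [PySem.Dict.contains, Bool.not_eq_true] at hc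
      intro hmem
      obtain ⟨q, hq, rfl⟩ := List.mem_map.mp hmem
      have := List.any_eq_false.mp hc q hq
      simp at this
    simp only [PySem.Dict.insert, hc, if_false]
    simp [List.Nodup.append, hn, hk]

theorem pbc_getD_mem (items : List (String × List PBCand)) (hn : (items.map Prod.fst).Nodup)
    (kv : String × List PBCand) (hm : kv ∈ items) :
    (PySem.Dict.mk items : PySem.Dict String (List PBCand)).getD kv.1 [] = kv.2 := by
  induction items with
  | nil => cases hm
  | cons p rest ih =>
    have hn' : (p.1 :: rest.map Prod.fst).Nodup := by simpa using hn
    rcases List.mem_cons.mp hm with rfl | hm'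
    · exact pbc_getD_cons_self _ _ _ (by simp)
    · have hne : (p.1 == kv.1) = false := by
        simp only [beq_eq_false_iff_ne]
        intro he
        have hmem : kv.1 ∈ rest.map Prod.fst := List.mem_map.mpr ⟨kv, hm', rfl⟩
        exact (List.nodup_cons.mp hn').1 (he ▸ hmem)
      rw [pbc_getD_cons_ne _ _ _ _ hne]
      exact ih (List.nodup_cons.mp hn').2 hm'

theorem pbc_find_insertBy (p : String × Int → Bool) (x : String × Int) (ys : List (String × Int))
    (h : ys.Pairwise (fun a b => b.2 ≤ a.2)) :
    List.find? p (PySem.List.insertBy (fun a b => decide (b.2 < a.2)) x ys)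
      = match List.find? p ys with
        | none => if p x then some x else none
        | some b => if p x then (if b.2 < x.2 then some x else some b) else some b := by
  induction ys with
  | nil => cases hp : p x <;> simp [PySem.List.insertBy, List.find?, hp]
  | cons y ys ih =>
    have hy : ∀ z ∈ ys, z.2 ≤ y.2 := (List.pairwise_cons.mp h).1
    by_cases hlt : y.2 < x.2
    · simp only [PySem.List.insertBy, hlt, decide_true, if_true]
      cases hp : p x with
      | true =>
        rw [List.find?_cons_of_pos hp]
        cases hf : List.find? p (y :: ys) with
        | none => simp [hp]
        | some b =>
          have hb : b ∈ y :: ys := List.mem_of_find?_eq_some hf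
          have hble : b.2 ≤ y.2 := by
            rcases List.mem_cons.mp hb with rfl | hb'
            · exact le_refl _
            · exact hy b hb'
          simp [hp, lt_of_le_of_lt hble hlt]
      | false =>
        rw [List.find?_cons_of_neg (by simp [hp])]
        cases hf : List.find? p (y :: ys) with
        | none => simp [hp]
        | some b => simp [hp]
    · simp only [PySem.List.insertBy, hlt, decide_false, Bool.false_eq_true, if_false]
      cases hpy : p y with
      | true =>
        rw [List.find?_cons_of_pos hpy, List.find?_cons_of_pos hpy]
        cases hp : p x <;> simp [hp, hlt]
      | false =>
        rw [List.find?_cons_of_neg (by simp [hpy]), List.find?_cons_of_neg (by simp [hpy])]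
        exact ih (List.pairwise_cons.mp h).2

theorem pbc_max?_concat {α κ : Type} [LinearOrder κ] (m : List α) (x : α) (key : α → κ) :
    PySem.List.max? (m ++ [x]) key
      = match PySem.List.max? m key with
        | none => some x
        | some b => if key b < key x then some x else some b := by
  cases hA : PySem.List.max? m key with
  | none =>
    simp only [hA]
    unfold PySem.List.max? at hA ⊢
    rw [List.foldl_append, hA]
    rfl
  | some b =>
    simp only [hA]
    unfold PySem.List.max? at hA ⊢
    rw [List.foldl_append, hA]
    rfl

theorem pbc_sorted_find (p : String × Int → Bool) (l : List (String × Int)) :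
    List.find? p (PySem.List.sorted l (fun kv => kv.2) true)
      = PySem.List.max? (l.filter p) (fun kv => kv.2) := by
  induction l using List.reverseRecOn with
  | nil => simp [PySem.List.sorted, PySem.List.max?]
  | append_singleton l x ih =>
    have hsort : PySem.List.sorted (l ++ [x]) (fun kv : String × Int => kv.2) true
        = PySem.List.insertBy (fun a b => decide (b.2 < a.2)) x
            (PySem.List.sorted l (fun kv : String × Int => kv.2) true) := by
      rw [PySem.List.sorted_rev_eq_foldl_insertBy, PySem.List.sorted_rev_eq_foldl_insertBy,
          List.foldl_append, List.foldl_cons, List.foldl_nil]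
    rw [hsort, pbc_find_insertBy p x _ (PySem.List.sorted_pairwise_rev l _), ih]
    rw [List.filter_append]
    cases hp : p x with
    | true =>
      simp only [List.filter_cons, hp, if_true, List.filter_nil]
      rw [pbc_max?_concat]
      cases hm : PySem.List.max? (l.filter p) (fun kv => kv.2) <;> simp [hm]
    | false =>
      cases hm : PySem.List.max? (l.filter p) (fun kv => kv.2) <;> simp [hm, hp]

theorem pbc_max?_fst (m : List (String × Int)) (g : String → Int)
    (hg : ∀ kv ∈ m, g kv.1 = kv.2) :
    PySem.List.max? (m.map Prod.fst) g = (PySem.List.max? m (fun kv => kv.2)).map Prod.fst := by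
  induction m using List.reverseRecOn with
  | nil => rfl
  | append_singleton m kv ih =>
    have hg' : ∀ q ∈ m, g q.1 = q.2 := fun q hq => hg q (by simp [hq])
    have hkv : g kv.1 = kv.2 := hg kv (by simp)
    rw [List.map_append, List.map_singleton, pbc_max?_concat, pbc_max?_concat, ih hg']
    cases hA : PySem.List.max? m (fun q : String × Int => q.2) with
    | none => simp
    | some b =>
      have hb : g b.1 = b.2 := hg' b (PySem.List.max?_mem hA)
      simp only [Option.map_some, hb, hkv]
      by_cases hcmp : b.2 < kv.2 <;> simp [hcmp]

theorem pbc_nodup_stepB (d : PySem.Dict String (List PBCand)) (c : PBCand)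
    (hn : (d.items.map Prod.fst).Nodup) : (((pbcStepB d c).items).map Prod.fst).Nodup := by
  cases hc : pbcClub? c with
  | none => simpa [pbcStepB, hc] using hn
  | some club =>
    by_cases hb : club = ""
    · simpa [pbcStepB, hc, hb] using hn
    · simp only [pbcStepB, hc, hb, ne_eq, not_false_eq_true, if_true]
      exact pbc_nodup_insert _ _ _ hn

theorem pbc_fold_nodup (cs : List PBCand) (d : PySem.Dict String (List PBCand))
    (hn : (d.items.map Prod.fst).Nodup) : (((cs.foldl pbcStepB d).items).map Prod.fst).Nodup := by
  induction cs generalizing d with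
  | nil => exact hn
  | cons c cs ih => exact ih _ (pbc_nodup_stepB d c hn)

theorem pbc_fold_inv (cs : List PBCand) (counts : PySem.Dict String Int)
    (clubs : PySem.Dict String (List PBCand))
    (h : counts.items = clubs.items.map pbcVal) (hn : (clubs.items.map Prod.fst).Nodup) :
    (cs.foldl pbcStepA (counts, clubs)).1.items
      = ((cs.foldl pbcStepA (counts, clubs)).2).items.map pbcVal := by
  induction cs generalizing counts clubs with
  | nil => exact h
  | cons c cs ih =>
    simp only [List.foldl_cons]
    cases hc : pbcClub? c with
    | none =>
      simp only [pbcStepA, hc]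
      exact ih counts clubs h hn
    | some club =>
      by_cases hb : club = ""
      · simp only [pbcStepA, hc, hb, if_true]
        exact ih counts clubs h hn
      · simp only [pbcStepA, hc, hb, if_false]
        obtain ⟨ci⟩ := counts
        obtain ⟨li⟩ := clubs
        simp only at h
        subst h
        exact ih _ _ (pbc_insert_map li hn club c) (pbc_nodup_insert _ _ _ hn)

theorem pbc_scan_eq (l : List (String × Int)) (e : Option String)
    (clubs : PySem.Dict String (List PBCand)) :
    pbcScanA l e clubs
      = match List.find? (fun kv => decide (e ≠ some kv.1)) l with
        | none => (none, [])
        | some kv => (some kv.1, clubs.getD kv.1 []) := by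
  induction l with
  | nil => rfl
  | cons kv rest ih =>
    obtain ⟨club, cnt⟩ := kv
    by_cases he : e ≠ some club
    · rw [List.find?_cons_of_pos (by simpa using he)]
      simp [pbcScanA, he]
    · rw [List.find?_cons_of_neg (by simpa using he)]
      simp only [pbcScanA, he, if_false]
      exact ih

-- ===== VERDICT (by name: the statement is the Claim_ definition above) =====
theorem pick_best_club_spec : Claim_equal_pick_best_club := by
  intro cands e _
  show pick_best_club cands e = pick_best_club_alt cands e
  simp only [pick_best_club, pick_best_club_alt]
  rw [← pbc_fold_snd cands (PySem.Dict.mk [], PySem.Dict.mk [])]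
  set F := cands.foldl pbcStepA (PySem.Dict.mk [], PySem.Dict.mk []) with hF
  have hnod : ((F.2).items.map Prod.fst).Nodup := by
    rw [pbc_fold_snd]; exact pbc_fold_nodup cands _ (by simp)
  have hinv : F.1.items = F.2.items.map pbcVal :=
    pbc_fold_inv cands _ _ (by simp) (by simp)
  by_cases hnil : F.2.items = []
  · simp [hinv, hnil, PySem.Dict.keys, PySem.List.max?]
  · rw [hinv]
    rw [if_neg (by simpa using hnil)]
    rw [pbc_scan_eq, pbc_sorted_find]
    have hkeys : (F.2).keys = (F.2.items.map pbcVal).map Prod.fst := by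
      simp [PySem.Dict.keys, List.map_map, pbcVal]
    have hpe : ((fun club => decide (e ≠ some club)) ∘ (Prod.fst : String × Int → String))
        = (fun kv : String × Int => decide (e ≠ some kv.1)) := rfl
    have hBfil : List.filter (fun club => decide (e ≠ some club)) ((F.2.items.map pbcVal).map Prod.fst)
        = (List.filter (fun kv : String × Int => decide (e ≠ some kv.1)) (F.2.items.map pbcVal)).map Prod.fst := by
      rw [List.filter_map, hpe]
    have hg : ∀ kv ∈ (F.2.items.map pbcVal).filter (fun kv : String × Int => decide (e ≠ some kv.1)),
        ((F.2.getD kv.1 []).length : Int) = kv.2 := by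
      intro kv hkv
      have hkv' : kv ∈ F.2.items.map pbcVal := List.mem_of_mem_filter hkv
      obtain ⟨q, hq, rfl⟩ := List.mem_map.mp hkv'
      have := pbc_getD_mem F.2.items hnod q hq
      simp [pbcVal, this]
    rw [hkeys, hBfil, pbc_max?_fst _ _ hg]
    cases hR : PySem.List.max?
        ((F.2.items.map pbcVal).filter (fun kv : String × Int => decide (e ≠ some kv.1)))
        (fun kv => kv.2) <;> simp [hR]
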